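-- pv_equiv track=rewrite | github.com/BJV-git/leetcode | math/isPower3.py | ispower3
-- ===== SOURCE A (Python) =====
-- def ispower3(n):
--     if n <= 0:
--         return False
--     if n == 1:
--         return True
--     temp = 3
--     while True:
--         if temp > n:
--             return False
--         if temp == n:
--             return True
--         temp = temp * 3
-- ===== SOURCE B (Python) =====
-- def ispower3(n):
--     if n <= 0:
--         return False
--     while n % 3 == 0:
--         n //= 3
--     return n == 1
-- ===== Notes on version B (the rewrite author's own statement) =====
-- stated objective: idiomatic
-- what changed: Instead of growing successive powers of three until they reach or pass n, B strips factors of three out of n itself with a modulo-then-floor-divide loop and checks the residue is one.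
import Mathlib
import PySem

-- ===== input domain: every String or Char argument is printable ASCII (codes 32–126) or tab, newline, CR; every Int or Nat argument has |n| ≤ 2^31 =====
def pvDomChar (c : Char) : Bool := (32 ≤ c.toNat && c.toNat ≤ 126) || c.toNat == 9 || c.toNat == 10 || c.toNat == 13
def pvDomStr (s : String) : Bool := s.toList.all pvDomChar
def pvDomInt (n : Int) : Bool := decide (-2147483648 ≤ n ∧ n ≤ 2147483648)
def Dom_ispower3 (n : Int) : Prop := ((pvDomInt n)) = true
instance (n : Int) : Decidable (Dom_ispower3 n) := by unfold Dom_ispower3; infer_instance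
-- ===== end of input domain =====

-- B strips factors of 3 out of n and checks the residue is 1, instead of growing powers of 3 up to n (idiomatic).


-- ===== PORT A =====
-- A's `while True` loop over temp; the `t ≤ 0` branch is only a totality guard
-- (temp is always a positive power of 3, so it is never taken on A's calls).
def pvLoopA (t n : Int) : Bool :=
  if t > n then false
  else if t = n then true
  else if t ≤ 0 then false
  else pvLoopA (3 * t) n
termination_by (n - t).toNat
decreasing_by omega

def ispower3 (n : Int) : Bool :=
  if n ≤ 0 then false
  else if n = 1 then true
  else pvLoopA 3 n

-- ===== PORT B =====
-- B's `while n % 3 == 0: n //= 3`; the `0 < n` conjunct is only a totality guard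
-- (B only runs the loop after the n ≤ 0 check, so it never changes the result).
def pvLoopB (n : Int) : Int :=
  if 0 < n ∧ PySem.Int.mod n 3 = 0 then pvLoopB (PySem.Int.floordiv n 3)
  else n
termination_by n.toNat
decreasing_by
  rename_i h
  rw [PySem.Int.floordiv_eq_ediv_of_pos (by omega)]
  omega

def ispower3_alt (n : Int) : Bool :=
  if n ≤ 0 then false
  else decide (pvLoopB n = 1)

-- ===== PRECONDITION & SPEC =====
def Spec_ispower3 (n : Int) (out : Bool) : Prop := out = ispower3_alt n
instance (n : Int) (out : Bool) : Decidable (Spec_ispower3 n out) := by unfold Spec_ispower3; infer_instance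

-- ===== CLAIM (what is proved, stated in full; the proofs are below) =====
def Claim_equal_ispower3 : Prop := ∀ (n : Int), Dom_ispower3 n → Spec_ispower3 n (ispower3 n)

-- ===== LEMMAS AND PROOFS =====

-- B's loop result is 1 exactly on powers of 3 (for positive n).
theorem pvLoopB_iff (m : Nat) : ∀ n : Int, n.toNat ≤ m → 0 < n →
    (pvLoopB n = 1 ↔ ∃ k : Nat, n = (3 : Int) ^ k) := by
  induction m with
  | zero => intro n h hn; omega
  | succ m ih =>
    intro n h hn
    rw [pvLoopB]
    by_cases hd : PySem.Int.mod n 3 = 0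
    · have h3 : (3 : Int) ∣ n := (PySem.Int.mod_eq_zero_iff_dvd n 3).mp hd
      obtain ⟨c, hc⟩ := h3
      have hfd : PySem.Int.floordiv n 3 = c := by
        rw [PySem.Int.floordiv_eq_ediv_of_pos (by norm_num), hc,
          Int.mul_ediv_cancel_left _ (by norm_num)]
      have hcpos : 0 < c := by omega
      rw [if_pos ⟨hn, hd⟩, hfd, ih c (by omega) hcpos]
      constructor
      · rintro ⟨k, hk⟩
        exact ⟨k + 1, by rw [hc, hk]; ring⟩
      · rintro ⟨k, hk⟩
        cases k with
        | zero => simp at hk; omega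
        | succ k =>
          refine ⟨k, ?_⟩
          have : (3 : Int) * c = 3 * 3 ^ k := by rw [← hc, hk]; ring
          omega
    · rw [if_neg (by tauto)]
      constructor
      · rintro rfl; exact ⟨0, by norm_num⟩
      · rintro ⟨k, hk⟩
        cases k with
        | zero => simpa using hk
        | succ k =>
          exfalso; apply hd
          rw [PySem.Int.mod_eq_zero_iff_dvd, hk, pow_succ]
          exact ⟨3 ^ k, by ring⟩

-- A's loop starting from 3^j finds n exactly when n = 3^k for some k ≥ j.
theorem pvLoopA_iff (m : Nat) : ∀ (j : Nat) (n : Int), (n - 3 ^ j).toNat ≤ m →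
    (pvLoopA ((3 : Int) ^ j) n = true ↔ ∃ k : Nat, j ≤ k ∧ n = (3 : Int) ^ k) := by
  have hmono : ∀ j k : Nat, j ≤ k → (3 : Int) ^ j ≤ 3 ^ k := fun j k h =>
    pow_le_pow_right₀ (by norm_num) h
  have hpos : ∀ j : Nat, (0 : Int) < 3 ^ j := fun j => pow_pos (by norm_num) j
  induction m with
  | zero =>
    intro j n h
    rw [pvLoopA]
    by_cases hgt : (3 : Int) ^ j > n
    · rw [if_pos hgt]
      simp only [Bool.false_eq_true, false_iff]
      rintro ⟨k, hjk, rfl⟩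
      exact absurd (hmono j k hjk) (by omega)
    · have heq : (3 : Int) ^ j = n := by omega
      rw [if_neg hgt, if_pos heq]
      exact ⟨fun _ => ⟨j, le_rfl, heq.symm⟩, fun _ => rfl⟩
  | succ m ih =>
    intro j n h
    rw [pvLoopA]
    by_cases hgt : (3 : Int) ^ j > n
    · rw [if_pos hgt]
      simp only [Bool.false_eq_true, false_iff]
      rintro ⟨k, hjk, rfl⟩
      exact absurd (hmono j k hjk) (by omega)
    · by_cases heq : (3 : Int) ^ j = n
      · rw [if_neg hgt, if_pos heq]
        exact ⟨fun _ => ⟨j, le_rfl, heq.symm⟩, fun _ => rfl⟩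
      · have hple := hpos j
        rw [if_neg hgt, if_neg heq, if_neg (by omega)]
        have h31 : (3 : Int) * 3 ^ j = 3 ^ (j + 1) := by ring
        have hnext := ih (j + 1) n (by have := hpos j; rw [pow_succ]; omega)
        rw [h31, hnext]
        constructor
        · rintro ⟨k, hjk, hk⟩; exact ⟨k, by omega, hk⟩
        · rintro ⟨k, hjk, hk⟩
          refine ⟨k, ?_, hk⟩
          rcases Nat.eq_or_lt_of_le hjk with rfl | hlt
          · exact absurd hk.symm heq
          · omega

-- ===== VERDICT (by name: the statement is the Claim_ definition above) =====
theorem ispower3_spec : Claim_equal_ispower3 := by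
  intro n _
  show ispower3 n = ispower3_alt n
  unfold ispower3 ispower3_alt
  by_cases h0 : n ≤ 0
  · simp [h0]
  · rw [if_neg h0, if_neg h0]
    by_cases h1 : n = 1
    · subst h1
      rw [if_pos rfl]
      have hm : ¬ (0 < (1 : Int) ∧ PySem.Int.mod 1 3 = 0) := by decide
      have h1e : pvLoopB 1 = 1 := by rw [pvLoopB, if_neg hm]
      simp [h1e]
    · rw [if_neg h1]
      have hn2 : 2 ≤ n := by omega
      have hA := pvLoopA_iff (n - 3 ^ 1).toNat 1 n le_rfl
      have hB := pvLoopB_iff n.toNat n le_rfl (by omega)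
      norm_num at hA
      by_cases hP : ∃ k : Nat, n = (3 : Int) ^ k
      · obtain ⟨k, hk⟩ := hP
        have hk0 : k ≠ 0 := by rintro rfl; simp at hk; omega
        have hAe : pvLoopA 3 n = true := hA.mpr ⟨k, by omega, hk⟩
        have hBe : pvLoopB n = 1 := hB.mpr ⟨k, hk⟩
        simp [hAe, hBe]
      · have hAe : pvLoopA 3 n = false := by
          cases hh : pvLoopA 3 n
          · rfl
          · obtain ⟨k, _, hk⟩ := hA.mp hh; exact absurd ⟨k, hk⟩ hP
        have hBe : pvLoopB n ≠ 1 := fun hc => hP (hB.mp hc)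
        simp [hAe, hBe]
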